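-- pv_equiv track=rewrite | github.com/SRINIKHIL2005/CipherCop | cipher cop/backend/heuristics/heuristics.py | tld_risk_score
-- ===== SOURCE A (Python) =====
-- def tld_risk_score(domain):
--     if not domain:
--         return 0
--     domain = domain.lower()
--     suspicious_tlds = ('.tk', '.ml', '.ga', '.cf', '.xyz', '.gq', '.top', '.club', '.online', '.site')
--     for tld in suspicious_tlds:
--         if domain.endswith(tld):
--             return 25
--     return 0
-- ===== SOURCE B (Python) =====
-- def tld_risk_score(domain):
--     parts = domain.lower().rsplit('.', 1)
--     if len(parts) == 2 and parts[1] in {'tk', 'ml', 'ga', 'cf', 'xyz', 'gq',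
--                                         'top', 'club', 'online', 'site'}:
--         return 25
--     return 0
-- ===== Notes on version B (the rewrite author's own statement) =====
-- stated objective: idiomatic
-- what changed: Replaces the loop of ten endswith suffix scans with one right-split at the last dot extracting the final DNS label followed by a single set-membership test; the two-part length check keeps the leading-dot requirement.
import Mathlib
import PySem

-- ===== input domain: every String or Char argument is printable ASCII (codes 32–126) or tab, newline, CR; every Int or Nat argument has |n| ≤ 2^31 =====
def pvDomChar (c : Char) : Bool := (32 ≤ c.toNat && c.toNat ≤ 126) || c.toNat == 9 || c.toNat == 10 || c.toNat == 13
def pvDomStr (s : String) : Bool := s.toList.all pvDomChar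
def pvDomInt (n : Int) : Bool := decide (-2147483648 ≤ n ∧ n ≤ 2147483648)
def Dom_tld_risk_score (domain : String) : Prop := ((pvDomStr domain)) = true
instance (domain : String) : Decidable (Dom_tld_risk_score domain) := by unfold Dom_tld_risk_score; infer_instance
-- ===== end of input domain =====

-- B replaces A's loop of ten endswith tests by one right-split at the last dot plus a single set-membership
-- test of the last DNS label (idiomatic; same behaviour, return value only, no side effects).

-- ===== PORT A =====
-- the tuple of suspicious TLDs, as in A
def pvSusTlds : List String :=
  [".tk", ".ml", ".ga", ".cf", ".xyz", ".gq", ".top", ".club", ".online", ".site"]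

-- A's 'for tld in suspicious_tlds: if domain.endswith(tld): return 25' loop
def pvTldLoopA (d : String) : List String → Int
  | [] => 0
  | t :: ts => if PySem.Str.endswith d t then 25 else pvTldLoopA d ts

def tld_risk_score (domain : String) : Int :=
  if domain = "" then 0
  else pvTldLoopA (PySem.Str.lower domain) pvSusTlds

-- ===== PORT B =====
-- hand port of str.rsplit('.', 1) (PySem has no rsplit): split off everything after the
-- LAST '.', exact for this separator/maxsplit: one part if no '.', else two parts
def pvRsplitDot1 (cs : List Char) : List (List Char) :=
  let r := cs.reverse
  let post := r.dropWhile (· ≠ '.')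
  if post = [] then [cs]
  else [post.tail.reverse, (r.takeWhile (· ≠ '.')).reverse]

-- the suspicious-TLD set of Source B (bare labels, no leading dot)
def pvSusLabels : List (List Char) :=
  [['t','k'], ['m','l'], ['g','a'], ['c','f'], ['x','y','z'], ['g','q'],
   ['t','o','p'], ['c','l','u','b'], ['o','n','l','i','n','e'], ['s','i','t','e']]

def tld_risk_score_alt (domain : String) : Int :=
  let parts := pvRsplitDot1 (PySem.Str.lower domain).toList
  if parts.length = 2 ∧ pvSusLabels.contains (parts.getD 1 []) then 25 else 0

-- ===== PRECONDITION & SPEC =====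
def Spec_tld_risk_score (domain : String) (out : Int) : Prop := out = tld_risk_score_alt domain
instance (domain : String) (out : Int) : Decidable (Spec_tld_risk_score domain out) := by unfold Spec_tld_risk_score; infer_instance

-- ===== CLAIM (what is proved, stated in full; the proofs are below) =====
def Claim_equal_tld_risk_score : Prop := ∀ (domain : String), Dom_tld_risk_score domain → Spec_tld_risk_score domain (tld_risk_score domain)

-- ===== LEMMAS AND PROOFS =====

-- takeWhile/dropWhile through a dot-free prefix followed by a '.'
theorem pv_take_drop (u v : List Char) (hu : '.' ∉ u) :
    ((u ++ '.' :: v).takeWhile (· ≠ '.') = u) ∧ ((u ++ '.' :: v).dropWhile (· ≠ '.') = '.' :: v) := by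
  induction u with
  | nil =>
    refine ⟨?_, ?_⟩ <;>
      rw [List.nil_append] <;> [rw [List.takeWhile_cons]; rw [List.dropWhile_cons]] <;>
      rw [if_neg (by simp)]
  | cons a u ih =>
    have ha : ¬ a = '.' := fun h => hu (by simp [h])
    have hu' : '.' ∉ u := fun h => hu (List.mem_cons_of_mem _ h)
    obtain ⟨h1, h2⟩ := ih hu'
    refine ⟨?_, ?_⟩
    · rw [List.cons_append, List.takeWhile_cons, if_pos (by simp [ha]), h1]
    · rw [List.cons_append, List.dropWhile_cons, if_pos (by simp [ha]), h2]

-- 'domain.endswith('.' + t)' for a dot-free label t, read off the reversed string: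
-- there must be a '.', and the characters after the last '.' must be exactly t.
theorem pv_endswith_dot (s t : List Char) (ht : '.' ∉ t) :
    PySem.Chars.endswith s ('.' :: t) = true ↔
      (s.reverse.dropWhile (· ≠ '.') ≠ [] ∧ s.reverse.takeWhile (· ≠ '.') = t.reverse) := by
  rw [PySem.Chars.endswith_iff, ← List.reverse_prefix]
  simp only [List.reverse_cons]
  have htr : '.' ∉ t.reverse := by simpa using ht
  constructor
  · rintro ⟨rest, hrest⟩
    obtain ⟨h1, h2⟩ := pv_take_drop t.reverse rest htr
    rw [← hrest]
    simp only [List.append_assoc, List.singleton_append]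
    exact ⟨by rw [h2]; simp, h1⟩
  · rintro ⟨hpost, htake⟩
    obtain ⟨c, rest, hcr⟩ := List.exists_cons_of_ne_nil hpost
    have hc : c = '.' := by
      have h := List.head?_dropWhile_not (fun x => decide (x ≠ '.')) s.reverse
      rw [hcr] at h
      simpa using h
    refine ⟨rest, ?_⟩
    conv_rhs => rw [← List.takeWhile_append_dropWhile (p := fun x => decide (x ≠ '.')) (l := s.reverse)]
    rw [htake, hcr, hc]
    simp

set_option maxHeartbeats 2000000 in
theorem tld_risk_score_spec : Claim_equal_tld_risk_score := by
  intro domain _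
  unfold Spec_tld_risk_score tld_risk_score tld_risk_score_alt pvRsplitDot1
  by_cases h0 : domain = ""
  · subst h0; decide
  · rw [if_neg h0]
    set d := PySem.Str.lower domain with hd
    set r := d.toList.reverse with hr
    simp only [pvTldLoopA, pvSusTlds, PySem.Str.endswith_eq]
    rw [show (".tk" : String).toList = '.' :: ['t','k'] from rfl,
        show (".ml" : String).toList = '.' :: ['m','l'] from rfl,
        show (".ga" : String).toList = '.' :: ['g','a'] from rfl,
        show (".cf" : String).toList = '.' :: ['c','f'] from rfl,
        show (".xyz" : String).toList = '.' :: ['x','y','z'] from rfl,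
        show (".gq" : String).toList = '.' :: ['g','q'] from rfl,
        show (".top" : String).toList = '.' :: ['t','o','p'] from rfl,
        show (".club" : String).toList = '.' :: ['c','l','u','b'] from rfl,
        show (".online" : String).toList = '.' :: ['o','n','l','i','n','e'] from rfl,
        show (".site" : String).toList = '.' :: ['s','i','t','e'] from rfl]
    by_cases hpost : r.dropWhile (· ≠ '.') = []
    · -- no dot: every endswith test is false, and B's single-part branch returns 0
      have hfalse : ∀ t : List Char, '.' ∉ t →
          PySem.Chars.endswith d.toList ('.' :: t) = false := by
        intro t ht
        rw [Bool.eq_false_iff]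
        intro hc
        rw [hr] at hpost
        exact ((pv_endswith_dot d.toList t ht).mp hc).1 hpost
      rw [hfalse _ (by decide), hfalse _ (by decide), hfalse _ (by decide),
          hfalse _ (by decide), hfalse _ (by decide), hfalse _ (by decide),
          hfalse _ (by decide), hfalse _ (by decide), hfalse _ (by decide),
          hfalse _ (by decide), if_pos hpost]
      simp
    · -- there is a dot: endswith('.' + t) decides 'last label = t'
      set pre := r.takeWhile (· ≠ '.') with hpre
      have hiff : ∀ t : List Char, '.' ∉ t →
          PySem.Chars.endswith d.toList ('.' :: t) = (pre.reverse == t) := by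
        intro t ht
        by_cases he : pre.reverse = t
        · rw [beq_iff_eq.mpr he]
          refine (pv_endswith_dot d.toList t ht).mpr ⟨by rw [hr] at hpost; exact hpost, ?_⟩
          rw [hr] at hpre
          rw [← hpre, ← he]
          simp
        · rw [beq_eq_false_iff_ne.mpr he, Bool.eq_false_iff]
          intro hc
          have h2 := ((pv_endswith_dot d.toList t ht).mp hc).2
          rw [← hr, ← hpre] at h2
          exact he (by rw [h2]; simp)
      rw [hiff _ (by decide), hiff _ (by decide), hiff _ (by decide), hiff _ (by decide),
          hiff _ (by decide), hiff _ (by decide), hiff _ (by decide), hiff _ (by decide),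
          hiff _ (by decide), hiff _ (by decide), if_neg hpost]
      simp only [List.getD, List.getElem?_cons_succ, List.getElem?_cons_zero, Option.getD_some]
      simp only [pvSusLabels, List.contains_cons, List.contains_nil]
      simp only [List.length_cons, List.length_nil, true_and]
      set q := pre.reverse with hq
      clear_value d r
      clear hiff hpre hpost hq hd
      clear_value q
      split_ifs <;> simp_all
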